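-- pv_equiv track=rewrite | github.com/flyzhouyx/6HAN | targetAddress.py | replace_wildcards
-- ===== SOURCE A (Python) =====
-- def replace_wildcards(pattern: str, replacement: str) -> str:
--     replaced = []
--     rep_idx = 0
--     for c in pattern:
--         if c == "*" and rep_idx < len(replacement):
--             replaced.append(replacement[rep_idx])
--             rep_idx += 1
--         else:
--             replaced.append(c)
--     return "".join(replaced)
-- ===== SOURCE B (Python) =====
-- def replace_wildcards(pattern: str, replacement: str) -> str:
--     segments = pattern.split("*")
--     parts = [segments[0]]
--     for i, seg in enumerate(segments[1:]):
--         parts.append(replacement[i] if i < len(replacement) else "*")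
--         parts.append(seg)
--     return "".join(parts)
-- ===== Notes on version B (the rewrite author's own statement) =====
-- stated objective: simpler
-- what changed: B splits the pattern on '*' once and interleaves the segments with the replacement characters (gap index = wildcard number), instead of A's character-by-character scan with a running replacement counter.
import Mathlib
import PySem

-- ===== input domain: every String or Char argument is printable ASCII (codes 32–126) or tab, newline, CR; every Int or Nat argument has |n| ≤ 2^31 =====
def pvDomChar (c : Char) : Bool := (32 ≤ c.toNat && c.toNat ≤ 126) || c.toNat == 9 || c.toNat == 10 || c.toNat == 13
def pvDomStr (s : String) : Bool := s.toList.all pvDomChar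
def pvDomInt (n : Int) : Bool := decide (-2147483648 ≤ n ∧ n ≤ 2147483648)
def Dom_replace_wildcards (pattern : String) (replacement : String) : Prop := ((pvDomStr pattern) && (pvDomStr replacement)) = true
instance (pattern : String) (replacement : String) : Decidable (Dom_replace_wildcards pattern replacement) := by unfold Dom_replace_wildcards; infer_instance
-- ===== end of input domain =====

-- B replaces A's character-by-character scan (with a running replacement counter) by a
-- split-on-'*' followed by interleaving the segments with the replacement characters (simpler decomposition).

-- ===== PORT A =====
-- literal port of A: scan pattern, append replacement[rep_idx] for '*' while rep_idx < len(replacement)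
def replace_wildcards (pattern : String) (replacement : String) : String :=
  String.mk (pattern.toList.foldl
    (fun (st : List Char × Nat) c =>
      if c = '*' ∧ st.2 < replacement.toList.length then
        (st.1 ++ [replacement.toList.getD st.2 ' '], st.2 + 1)
      else
        (st.1 ++ [c], st.2))
    ([], 0)).1

-- ===== PORT B =====
-- literal port of B: split pattern on '*' (pattern.split('*') ported as List.splitOn on the
-- char list — exact for a one-char separator), then interleave segments with replacement chars
def replace_wildcards_alt (pattern : String) (replacement : String) : String :=
  match pattern.toList.splitOn '*' with
  | [] => ""   -- unreachable: split never returns an empty list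
  | s0 :: rest =>
    String.mk ((PySem.List.enumerate rest).foldl
      (fun (acc : List Char) (p : Int × List Char) =>
        acc ++ (if p.1 < (replacement.toList.length : Int) then
                  [replacement.toList.getD p.1.toNat ' ']
                else ['*']) ++ p.2)
      s0)

-- ===== PRECONDITION & SPEC =====
def Spec_replace_wildcards (pattern : String) (replacement : String) (out : String) : Prop := out = replace_wildcards_alt pattern replacement
instance (pattern : String) (replacement : String) (out : String) : Decidable (Spec_replace_wildcards pattern replacement out) := by unfold Spec_replace_wildcards; infer_instance

-- ===== CLAIM (what is proved, stated in full; the proofs are below) =====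
def Claim_equal_replace_wildcards : Prop := ∀ (pattern : String) (replacement : String), Dom_replace_wildcards pattern replacement → Spec_replace_wildcards pattern replacement (replace_wildcards pattern replacement)

-- ===== LEMMAS AND PROOFS =====

-- the common recursive specification: g rep cs k = result chars, k = next replacement index
def pvG (rep : List Char) : List Char → Nat → List Char
  | [] => fun _ => []
  | c :: cs => fun k =>
    if c = '*' ∧ k < rep.length then rep.getD k ' ' :: pvG rep cs (k + 1)
    else c :: pvG rep cs k

-- once the replacement is exhausted, the index no longer matters
theorem pvG_saturated (rep : List Char) (cs : List Char) :
    ∀ k k', rep.length ≤ k → rep.length ≤ k' → pvG rep cs k = pvG rep cs k' := by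
  induction cs with
  | nil => intro k k' _ _; rfl
  | cons c cs ih =>
    intro k k' hk hk'
    simp only [pvG]
    rw [if_neg (by omega), if_neg (by omega)]
    exact congrArg _ (ih k k' hk hk')

-- A's loop computes pvG
theorem pvA_loop (rep : List Char) (cs : List Char) :
    ∀ (acc : List Char) (k : Nat),
      cs.foldl
        (fun (st : List Char × Nat) c =>
          if c = '*' ∧ st.2 < rep.length then
            (st.1 ++ [rep.getD st.2 ' '], st.2 + 1)
          else
            (st.1 ++ [c], st.2))
        (acc, k)
      = (acc ++ pvG rep cs k,
         (cs.foldl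
            (fun (st : List Char × Nat) c =>
              if c = '*' ∧ st.2 < rep.length then
                (st.1 ++ [rep.getD st.2 ' '], st.2 + 1)
              else
                (st.1 ++ [c], st.2))
            (acc, k)).2) := by
  induction cs with
  | nil => intro acc k; simp [pvG]
  | cons c cs ih =>
    intro acc k
    simp only [List.foldl_cons, pvG]
    by_cases h : c = '*' ∧ k < rep.length
    · rw [if_pos h, if_pos h, ih]; simp
    · rw [if_neg h, if_neg h, ih]; simp

-- B's interleaving loop, written as direct recursion over the segment list with a gap index
def pvLoop (rep : List Char) : List (List Char) → Nat → List Char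
  | [] => fun _ => []
  | seg :: rest => fun k =>
    (if k < rep.length then [rep.getD k ' '] else ['*']) ++ seg ++ pvLoop rep rest (k + 1)

theorem pvG_nil (rep : List Char) (k : Nat) : pvG rep [] k = [] := rfl

theorem pvLoop_nil (rep : List Char) (k : Nat) : pvLoop rep [] k = [] := rfl

-- B's foldl over enumerate equals pvLoop
theorem pvB_loop (rep : List Char) (rest : List (List Char)) :
    ∀ (k : Nat) (acc : List Char),
      (PySem.List.enumerate rest (k : Int)).foldl
        (fun (acc : List Char) (p : Int × List Char) =>
          acc ++ (if p.1 < (rep.length : Int) then [rep.getD p.1.toNat ' '] else ['*']) ++ p.2)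
        acc
      = acc ++ pvLoop rep rest k := by
  induction rest with
  | nil => intro k acc; rw [PySem.List.enumerate_nil]; simp [pvLoop_nil]
  | cons seg rest ih =>
    intro k acc
    rw [PySem.List.enumerate_cons]
    simp only [List.foldl_cons, pvLoop]
    have hcast : ((k : Int) + 1) = ((k + 1 : Nat) : Int) := by push_cast; ring
    rw [hcast, ih]
    by_cases h : k < rep.length
    · rw [if_pos (by exact_mod_cast h), if_pos h]
      simp [List.append_assoc, Int.toNat_natCast]
    · rw [if_neg (by omega), if_neg h]
      simp [List.append_assoc]

-- splitting then interleaving computes pvG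
theorem pvSplit_interleave (rep : List Char) (cs : List Char) :
    ∀ k, (match cs.splitOn '*' with
          | [] => []
          | s0 :: rest => s0 ++ pvLoop rep rest k) = pvG rep cs k := by
  induction cs with
  | nil => intro k; simp [List.splitOn, List.splitOnP_nil, pvG_nil, pvLoop_nil]
  | cons c cs ih =>
    intro k
    simp only [List.splitOn, List.splitOnP_cons] at *
    by_cases h : c = '*'
    · rw [if_pos (by simp [h])]
      rcases hsp : List.splitOnP (fun x => x == '*') cs with _ | ⟨s0, rest⟩
      · exact absurd hsp (List.splitOnP_ne_nil _ cs)
      · subst h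
        simp only [pvLoop, pvG]
        have hih := ih (k + 1)
        rw [hsp] at hih
        by_cases hk : k < rep.length
        · rw [if_pos hk, if_pos (by simp [hk])]
          simpa [List.append_assoc] using congrArg (rep.getD k ' ' :: ·) hih
        · rw [if_neg hk, if_neg (by simp [hk])]
          have hsat : pvG rep cs (k + 1) = pvG rep cs k :=
            pvG_saturated rep cs (k + 1) k (by omega) (by omega)
          rw [hsat] at hih
          simpa [List.append_assoc] using congrArg ('*' :: ·) hih
    · rw [if_neg (by simp [h])]
      rcases hsp : List.splitOnP (fun x => x == '*') cs with _ | ⟨s0, rest⟩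
      · exact absurd hsp (List.splitOnP_ne_nil _ cs)
      · simp only [List.modifyHead, pvG]
        have hih := ih k
        rw [hsp] at hih
        rw [if_neg (by simp [h])]
        rw [List.cons_append, ← hih]

-- ===== VERDICT (by name: the statement is the Claim_ definition above) =====
theorem replace_wildcards_spec : Claim_equal_replace_wildcards := by
  intro pattern replacement _
  unfold Spec_replace_wildcards replace_wildcards replace_wildcards_alt
  rw [pvA_loop replacement.toList pattern.toList [] 0]
  rcases hsp : pattern.toList.splitOn '*' with _ | ⟨s0, rest⟩
  · exact absurd hsp (List.splitOnP_ne_nil _ pattern.toList)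
  · have hb := pvB_loop replacement.toList rest 0 s0
    simp only [Nat.cast_zero] at hb
    have hs := pvSplit_interleave replacement.toList pattern.toList 0
    rw [hsp] at hs
    dsimp only
    dsimp only at hs
    rw [hb, hs]
    simp
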